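-- pv_equiv track=rewrite | github.com/kaq0817/Phoenixflowriselovable | phoenix_helper.py | _service_requirements_from_env_vars
-- ===== SOURCE A (Python) =====
-- def _service_requirements_from_env_vars(env_vars: list[str]) -> dict[str, list[str]]:
--     req: dict[str, list[str]] = {}
--
--     def add(service: str, keys: list[str]):
--         current = req.get(service, [])
--         for k in keys:
--             if k not in current:
--                 current.append(k)
--         req[service] = current
--
--     for v in env_vars:
--         u = v.upper()
--         if u.startswith("SHOPIFY_"):
--             add("Shopify", [u])
--         if u.startswith("ETSY_"):
--             add("Etsy", [u])
--         if u.startswith("SUPABASE_") or u.startswith("VITE_SUPABASE_"):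
--             add("Supabase", [u])
--         if u in {"GEMINI_API_KEY", "GOOGLE_API_KEY", "GOOGLE_GENAI_API_KEY"} or u.startswith("GEMINI_"):
--             add("Gemini", [u])
--         if u.startswith("OPENAI_"):
--             add("OpenAI", [u])
--         if u.startswith("CLOUDFLARE_") or u in {"CF_API_TOKEN", "CF_ACCOUNT_ID"}:
--             add("Cloudflare", [u])
--         if u.startswith("RESEND_") or u.startswith("ZOHO_") or u.startswith("SMTP_") or u.startswith("MAIL_"):
--             add("Email", [u])
--
--     # Provide a minimal sensible default set when a service is detected but env refs are missing/obfuscated.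
--     if "Shopify" in req:
--         add("Shopify", ["SHOPIFY_API_KEY", "SHOPIFY_API_SECRET", "SHOPIFY_STORE_DOMAIN"])
--     if "Etsy" in req:
--         # Etsy's "API key" is often labeled "Client ID" in the Etsy dashboard.
--         # Support both naming conventions; the setup wizard/preflight will accept either.
--         add("Etsy", ["ETSY_API_KEY", "ETSY_SHARED_SECRET", "ETSY_REDIRECT_URI"])
--     if "Supabase" in req:
--         add("Supabase", ["SUPABASE_URL", "SUPABASE_ANON_KEY"])
--     if "Gemini" in req:
--         add("Gemini", ["GEMINI_API_KEY"])
--     if "Cloudflare" in req: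
--         add("Cloudflare", ["CLOUDFLARE_ACCOUNT_ID", "CLOUDFLARE_API_TOKEN"])
--     if "Email" in req:
--         add("Email", ["RESEND_API_KEY", "MAIL_FROM"])
--
--     return req
-- ===== SOURCE B (Python) =====
-- # Group-by re-implementation: classify each env var once, derive the service
-- # order from first matches, then build each service's key list independently
-- # (matched vars, then defaults), instead of mutating one dict in a single pass.
--
-- _PREFIXES = {
--     "Shopify": ("SHOPIFY_",),
--     "Etsy": ("ETSY_",),
--     "Supabase": ("SUPABASE_", "VITE_SUPABASE_"),
--     "Gemini": ("GEMINI_",),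
--     "OpenAI": ("OPENAI_",),
--     "Cloudflare": ("CLOUDFLARE_",),
--     "Email": ("RESEND_", "ZOHO_", "SMTP_", "MAIL_"),
-- }
--
-- _EXACT = {
--     "Gemini": ("GEMINI_API_KEY", "GOOGLE_API_KEY", "GOOGLE_GENAI_API_KEY"),
--     "Cloudflare": ("CF_API_TOKEN", "CF_ACCOUNT_ID"),
-- }
--
-- _DEFAULTS = {
--     "Shopify": ("SHOPIFY_API_KEY", "SHOPIFY_API_SECRET", "SHOPIFY_STORE_DOMAIN"),
--     "Etsy": ("ETSY_API_KEY", "ETSY_SHARED_SECRET", "ETSY_REDIRECT_URI"),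
--     "Supabase": ("SUPABASE_URL", "SUPABASE_ANON_KEY"),
--     "Gemini": ("GEMINI_API_KEY",),
--     "Cloudflare": ("CLOUDFLARE_ACCOUNT_ID", "CLOUDFLARE_API_TOKEN"),
--     "Email": ("RESEND_API_KEY", "MAIL_FROM"),
-- }
--
--
-- def _services_of(u: str) -> list[str]:
--     return [s for s, ps in _PREFIXES.items()
--             if u.startswith(ps) or u in _EXACT.get(s, ())]
--
--
-- def _service_requirements_from_env_vars(env_vars: list[str]) -> dict[str, list[str]]:
--     tagged = [(v.upper(), _services_of(v.upper())) for v in env_vars]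
--     # service order = order of first appearance among the classified vars
--     order: list[str] = []
--     for _, ss in tagged:
--         for s in ss:
--             if s not in order:
--                 order.append(s)
--     # assemble each service's bucket independently: its matched vars, then defaults
--     req: dict[str, list[str]] = {}
--     for s in order:
--         keys: list[str] = []
--         for u, ss in tagged:
--             if s in ss and u not in keys:
--                 keys.append(u)
--         for k in _DEFAULTS.get(s, ()):
--             if k not in keys:
--                 keys.append(k)
--         req[s] = keys
--     return req
-- ===== Notes on version B (the rewrite author's own statement) =====
-- stated objective: alternative
-- what changed: Replaced A's single pass that mutates a shared dict per env var (plus a post-pass of six conditional default blocks) by a group-by: classify every var once into its matching services, derive the service order from first appearances, then build each service's key list independently by a per-service gather of matched vars followed by its defaults.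
import Mathlib
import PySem

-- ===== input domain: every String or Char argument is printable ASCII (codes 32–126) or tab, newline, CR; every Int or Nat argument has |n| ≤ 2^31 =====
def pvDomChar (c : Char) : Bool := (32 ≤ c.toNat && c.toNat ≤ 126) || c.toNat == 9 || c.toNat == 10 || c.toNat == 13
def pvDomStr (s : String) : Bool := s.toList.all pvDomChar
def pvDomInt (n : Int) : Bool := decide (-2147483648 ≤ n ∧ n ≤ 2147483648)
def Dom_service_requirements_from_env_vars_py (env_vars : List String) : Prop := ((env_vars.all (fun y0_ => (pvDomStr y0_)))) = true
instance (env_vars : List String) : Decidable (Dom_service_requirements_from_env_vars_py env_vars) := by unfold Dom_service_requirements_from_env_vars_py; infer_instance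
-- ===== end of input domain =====

-- B replaces A's single pass mutating a shared dict (plus a six-block defaults
-- post-pass) by a group-by: classify each var once, derive the service order,
-- then assemble each service's bucket independently (objective: alternative).

-- ===== PORT A =====
-- 'req[service] = current' after in-place append: ported as getD + foldl + insert (overwrite keeps position).
def pyAdd (req : PySem.Dict String (List String)) (service : String) (keys : List String) :
    PySem.Dict String (List String) :=
  let current := req.getD service []
  let current := keys.foldl (fun cur k => if cur.contains k then cur else cur ++ [k]) current
  req.insert service current

-- the body of A's 'for v in env_vars' loop ('u in {…}' set-literal membership ported as list membership)
def pyScanVar (req : PySem.Dict String (List String)) (v : String) :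
    PySem.Dict String (List String) :=
  let u := PySem.Str.upper v
  let req := if PySem.Str.startswith u "SHOPIFY_" then pyAdd req "Shopify" [u] else req
  let req := if PySem.Str.startswith u "ETSY_" then pyAdd req "Etsy" [u] else req
  let req := if PySem.Str.startswith u "SUPABASE_" || PySem.Str.startswith u "VITE_SUPABASE_" then
      pyAdd req "Supabase" [u] else req
  let req := if ["GEMINI_API_KEY", "GOOGLE_API_KEY", "GOOGLE_GENAI_API_KEY"].contains u ||
      PySem.Str.startswith u "GEMINI_" then pyAdd req "Gemini" [u] else req
  let req := if PySem.Str.startswith u "OPENAI_" then pyAdd req "OpenAI" [u] else req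
  let req := if PySem.Str.startswith u "CLOUDFLARE_" || ["CF_API_TOKEN", "CF_ACCOUNT_ID"].contains u then
      pyAdd req "Cloudflare" [u] else req
  let req := if PySem.Str.startswith u "RESEND_" || PySem.Str.startswith u "ZOHO_" ||
      PySem.Str.startswith u "SMTP_" || PySem.Str.startswith u "MAIL_" then pyAdd req "Email" [u] else req
  req

def service_requirements_from_env_vars_py (env_vars : List String) : List (String × List String) :=
  let req : PySem.Dict String (List String) := PySem.Dict.empty
  let req := env_vars.foldl pyScanVar req
  let req := if req.contains "Shopify" then
      pyAdd req "Shopify" ["SHOPIFY_API_KEY", "SHOPIFY_API_SECRET", "SHOPIFY_STORE_DOMAIN"] else req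
  let req := if req.contains "Etsy" then
      pyAdd req "Etsy" ["ETSY_API_KEY", "ETSY_SHARED_SECRET", "ETSY_REDIRECT_URI"] else req
  let req := if req.contains "Supabase" then
      pyAdd req "Supabase" ["SUPABASE_URL", "SUPABASE_ANON_KEY"] else req
  let req := if req.contains "Gemini" then pyAdd req "Gemini" ["GEMINI_API_KEY"] else req
  let req := if req.contains "Cloudflare" then
      pyAdd req "Cloudflare" ["CLOUDFLARE_ACCOUNT_ID", "CLOUDFLARE_API_TOKEN"] else req
  let req := if req.contains "Email" then pyAdd req "Email" ["RESEND_API_KEY", "MAIL_FROM"] else req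
  req.items

-- ===== PORT B =====
-- _PREFIXES / _EXACT / _DEFAULTS dicts, ported as insertion-ordered association lists
def pvPrefixes : List (String × List String) :=
  [ ("Shopify", ["SHOPIFY_"]),
    ("Etsy", ["ETSY_"]),
    ("Supabase", ["SUPABASE_", "VITE_SUPABASE_"]),
    ("Gemini", ["GEMINI_"]),
    ("OpenAI", ["OPENAI_"]),
    ("Cloudflare", ["CLOUDFLARE_"]),
    ("Email", ["RESEND_", "ZOHO_", "SMTP_", "MAIL_"]) ]

def pvExact : List (String × List String) :=
  [ ("Gemini", ["GEMINI_API_KEY", "GOOGLE_API_KEY", "GOOGLE_GENAI_API_KEY"]),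
    ("Cloudflare", ["CF_API_TOKEN", "CF_ACCOUNT_ID"]) ]

def pvDefaults : List (String × List String) :=
  [ ("Shopify", ["SHOPIFY_API_KEY", "SHOPIFY_API_SECRET", "SHOPIFY_STORE_DOMAIN"]),
    ("Etsy", ["ETSY_API_KEY", "ETSY_SHARED_SECRET", "ETSY_REDIRECT_URI"]),
    ("Supabase", ["SUPABASE_URL", "SUPABASE_ANON_KEY"]),
    ("Gemini", ["GEMINI_API_KEY"]),
    ("Cloudflare", ["CLOUDFLARE_ACCOUNT_ID", "CLOUDFLARE_API_TOKEN"]),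
    ("Email", ["RESEND_API_KEY", "MAIL_FROM"]) ]

-- tbl.get(s, ()) on an association list
def pvLookup (tbl : List (String × List String)) (s : String) : List String :=
  match tbl.find? (fun e => e.1 == s) with
  | some e => e.2
  | none => []

-- _services_of: the comprehension over _PREFIXES.items()
def pvServicesOf (u : String) : List String :=
  (pvPrefixes.filter (fun e =>
    e.2.any (fun p => PySem.Str.startswith u p) || (pvLookup pvExact e.1).contains u)).map (·.1)

def service_requirements_from_env_vars_py_alt (env_vars : List String) : List (String × List String) :=
  let tagged := env_vars.map (fun v => (PySem.Str.upper v, pvServicesOf (PySem.Str.upper v)))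
  -- service order = order of first appearance among the classified vars
  let order := tagged.foldl (fun o t =>
      t.2.foldl (fun o s => if o.contains s then o else o ++ [s]) o) ([] : List String)
  -- assemble each service's bucket independently: matched vars, then defaults
  let req := order.foldl (fun d s =>
      let keys := tagged.foldl (fun ks t =>
          if t.2.contains s && !ks.contains t.1 then ks ++ [t.1] else ks) ([] : List String)
      let keys := (pvLookup pvDefaults s).foldl (fun ks k =>
          if ks.contains k then ks else ks ++ [k]) keys
      d.insert s keys) (PySem.Dict.empty : PySem.Dict String (List String))
  req.items

-- ===== PRECONDITION & SPEC =====
def Spec_service_requirements_from_env_vars_py (env_vars : List String) (out : List (String × List String)) : Prop := out = service_requirements_from_env_vars_py_alt env_vars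
instance (env_vars : List String) (out : List (String × List String)) : Decidable (Spec_service_requirements_from_env_vars_py env_vars out) := by unfold Spec_service_requirements_from_env_vars_py; infer_instance

-- ===== CLAIM (what is proved, stated in full; the proofs are below) =====
def Claim_equal_service_requirements_from_env_vars_py : Prop := ∀ (env_vars : List String), Dom_service_requirements_from_env_vars_py env_vars → Spec_service_requirements_from_env_vars_py env_vars (service_requirements_from_env_vars_py env_vars)

-- ===== LEMMAS AND PROOFS =====

-- the elementary add-one-pair step both programs reduce to
def pvStep (d : PySem.Dict String (List String)) (p : String × String) :
    PySem.Dict String (List String) :=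
  d.insert p.1 (PySem.Set.add (d.getD p.1 []) p.2)

-- the flattened (service, upper var) match sequence
def pvPairs (env_vars : List String) : List (String × String) :=
  env_vars.flatMap (fun v => (pvServicesOf (PySem.Str.upper v)).map (fun s => (s, PySem.Str.upper v)))

-- A's six-conditional defaults pass, named so the proofs can speak about it
def pvDefPass (d : PySem.Dict String (List String)) : PySem.Dict String (List String) :=
  let d := if d.contains "Shopify" then
      pyAdd d "Shopify" ["SHOPIFY_API_KEY", "SHOPIFY_API_SECRET", "SHOPIFY_STORE_DOMAIN"] else d
  let d := if d.contains "Etsy" then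
      pyAdd d "Etsy" ["ETSY_API_KEY", "ETSY_SHARED_SECRET", "ETSY_REDIRECT_URI"] else d
  let d := if d.contains "Supabase" then
      pyAdd d "Supabase" ["SUPABASE_URL", "SUPABASE_ANON_KEY"] else d
  let d := if d.contains "Gemini" then pyAdd d "Gemini" ["GEMINI_API_KEY"] else d
  let d := if d.contains "Cloudflare" then
      pyAdd d "Cloudflare" ["CLOUDFLARE_ACCOUNT_ID", "CLOUDFLARE_API_TOKEN"] else d
  let d := if d.contains "Email" then pyAdd d "Email" ["RESEND_API_KEY", "MAIL_FROM"] else d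
  d

theorem pv_A_eq (env_vars : List String) :
    service_requirements_from_env_vars_py env_vars =
      (pvDefPass (env_vars.foldl pyScanVar PySem.Dict.empty)).items := rfl

theorem pv_foldl_filter_map {α β γ : Type} (l : List α) (c : α → Bool) (g : α → β)
    (f : γ → β → γ) (d : γ) :
    ((l.filter c).map g).foldl f d = l.foldl (fun d e => if c e then f d (g e) else d) d := by
  induction l generalizing d with
  | nil => rfl
  | cons x xs ih => by_cases h : c x <;> simp [h, ih]

theorem pv_step_congr (X u : String) {cA cB : Bool} {dA dB : PySem.Dict String (List String)}
    (h : cA = cB) (hd : dA = dB) :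
    (if cA then pyAdd dA X [u] else dA) = (if cB then pvStep dB (X, u) else dB) := by
  subst h; subst hd; cases cA
  · rfl
  · rfl

theorem pv_scan_eq (d : PySem.Dict String (List String)) (v : String) :
    pyScanVar d v = (pvServicesOf (PySem.Str.upper v)).foldl
      (fun d s => pvStep d (s, PySem.Str.upper v)) d := by
  simp only [pyScanVar]
  generalize PySem.Str.upper v = u
  simp only [pvServicesOf]
  rw [pv_foldl_filter_map]
  simp only [pvPrefixes, List.foldl_cons, List.foldl_nil]
  refine pv_step_congr _ _ ?_ (pv_step_congr _ _ ?_ (pv_step_congr _ _ ?_ (pv_step_congr _ _ ?_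
    (pv_step_congr _ _ ?_ (pv_step_congr _ _ ?_ (pv_step_congr _ _ ?_ rfl))))))
  all_goals simp [pvLookup, pvExact, List.any_cons, List.any_nil, Bool.or_assoc]
  all_goals simp [Bool.or_comm, Bool.or_assoc]

theorem pv_A_fold (env_vars : List String) (d : PySem.Dict String (List String)) :
    env_vars.foldl pyScanVar d = (pvPairs env_vars).foldl pvStep d := by
  induction env_vars generalizing d with
  | nil => rfl
  | cons v vs ih =>
    simp only [List.foldl_cons, pvPairs, List.flatMap_cons, List.foldl_append, List.foldl_map,
      pv_scan_eq]
    exact ih _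

theorem pv_getD_foldl_step (ps : List (String × String)) (d : PySem.Dict String (List String))
    (s : String) :
    ((ps.foldl pvStep d).getD s []) =
      PySem.Set.update (d.getD s []) ((ps.filter (fun p => p.1 == s)).map (·.2)) := by
  induction ps generalizing d with
  | nil => simp [PySem.Set.update]
  | cons p ps ih =>
    by_cases h : p.1 = s
    · subst h
      simp only [List.foldl_cons, ih, List.filter_cons, beq_self_eq_true, if_pos, List.map_cons]
      rw [PySem.Set.update_cons]
      simp [pvStep]
    · simp only [List.foldl_cons, ih, List.filter_cons]
      have hb : (p.1 == s) = false := by simp [h]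
      simp only [hb, Bool.false_eq_true, if_neg, not_false_iff]
      congr 1
      simp [pvStep, PySem.Dict.getD_insert, Ne.symm h]

theorem pv_keys_foldl_step (ps : List (String × String)) (d : PySem.Dict String (List String)) :
    (ps.foldl pvStep d).keys = PySem.Set.update d.keys (ps.map (·.1)) := by
  have e : pvStep = (fun (d : PySem.Dict String (List String)) (x : String × String) =>
      d.insert x.1 (PySem.Set.add (d.getD x.1 []) x.2)) := rfl
  rw [e]
  exact PySem.Dict.keys_foldl_insert_key ps (·.1) _ d

theorem pv_nodup_keys_foldl_step (ps : List (String × String))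
    (d : PySem.Dict String (List String)) (h : d.keys.Nodup) :
    (ps.foldl pvStep d).keys.Nodup := by
  have e : pvStep = (fun (d : PySem.Dict String (List String)) (x : String × String) =>
      d.insert x.1 (PySem.Set.add (d.getD x.1 []) x.2)) := rfl
  rw [e]
  exact PySem.Dict.nodup_keys_foldl_insert_key ps (·.1) _ d h

-- one conditional default block: keys, other-key lookups and contains are untouched
theorem pv_if_add_keys (d : PySem.Dict String (List String)) (X : String) (l : List String) :
    (if d.contains X then pyAdd d X l else d).keys = d.keys := by
  by_cases h : d.contains X <;>
    simp [h, pyAdd, PySem.Dict.keys_insert_of_contains]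

theorem pv_if_add_contains (d : PySem.Dict String (List String)) (X : String) (l : List String)
    (s : String) : (if d.contains X then pyAdd d X l else d).contains s = d.contains s := by
  by_cases h : d.contains X <;> by_cases hs : s = X <;>
    simp [h, hs, pyAdd, PySem.Dict.contains_insert]

theorem pv_if_add_getD_ne (d : PySem.Dict String (List String)) (X : String) (l : List String)
    (s : String) (h : s ≠ X) :
    (if d.contains X then pyAdd d X l else d).getD s [] = d.getD s [] := by
  by_cases hc : d.contains X <;> simp [hc, pyAdd, PySem.Dict.getD_insert, h]

theorem pv_pyAdd_getD_self (d : PySem.Dict String (List String)) (X : String)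
    (l : List String) :
    (pyAdd d X l).getD X [] = PySem.Set.update (d.getD X []) l := by
  simp only [pyAdd]
  rw [PySem.Dict.getD_insert_self]
  rfl

theorem pv_defpass_eq_foldl (d : PySem.Dict String (List String)) :
    pvDefPass d = pvDefaults.foldl
      (fun d e => if d.contains e.1 then pyAdd d e.1 e.2 else d) d := rfl

theorem pv_deffold_keys (tbl : List (String × List String)) (d : PySem.Dict String (List String)) :
    (tbl.foldl (fun d e => if d.contains e.1 then pyAdd d e.1 e.2 else d) d).keys = d.keys := by
  induction tbl generalizing d with
  | nil => rfl
  | cons e tbl ih => simp [ih, pv_if_add_keys]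

theorem pv_deffold_getD_ne (tbl : List (String × List String)) (d : PySem.Dict String (List String))
    (s : String) (hs : s ∉ tbl.map (·.1)) :
    (tbl.foldl (fun d e => if d.contains e.1 then pyAdd d e.1 e.2 else d) d).getD s [] =
      d.getD s [] := by
  induction tbl generalizing d with
  | nil => rfl
  | cons e tbl ih =>
    simp only [List.map_cons, List.mem_cons, not_or] at hs
    simp only [List.foldl_cons]
    rw [ih _ hs.2, pv_if_add_getD_ne _ _ _ _ hs.1]

theorem pv_deffold_getD (tbl : List (String × List String)) (d : PySem.Dict String (List String))
    (s : String) (hnd : (tbl.map (·.1)).Nodup) (hc : d.contains s = true) :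
    (tbl.foldl (fun d e => if d.contains e.1 then pyAdd d e.1 e.2 else d) d).getD s [] =
      PySem.Set.update (d.getD s []) (pvLookup tbl s) := by
  induction tbl generalizing d with
  | nil => rfl
  | cons e tbl ih =>
    simp only [List.map_cons, List.nodup_cons] at hnd
    obtain ⟨he, hnd⟩ := hnd
    by_cases h : e.1 = s
    · subst h
      simp only [List.foldl_cons, hc, if_pos]
      rw [pv_deffold_getD_ne _ _ _ (by simpa using he), pv_pyAdd_getD_self]
      simp [pvLookup, List.find?_cons]
    · have hb : (e.1 == s) = false := by simp [h]
      simp only [List.foldl_cons]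
      have hc' : (if d.contains e.1 = true then pyAdd d e.1 e.2 else d).contains s = true := by
        rw [pv_if_add_contains]; exact hc
      rw [ih _ hnd hc', pv_if_add_getD_ne _ _ _ _ (Ne.symm h)]
      simp [pvLookup, List.find?_cons, hb]

theorem pv_nodup_services (u : String) : (pvServicesOf u).Nodup := by
  have hsub : List.Sublist (pvServicesOf u) (pvPrefixes.map (·.1)) :=
    List.Sublist.map _ List.filter_sublist
  exact (by decide : (pvPrefixes.map (·.1)).Nodup).sublist hsub

theorem pv_foldl_update (l : List (String × List String)) (o : List String) :
    l.foldl (fun o t => PySem.Set.update o t.2) o = PySem.Set.update o (l.flatMap (·.2)) := by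
  induction l generalizing o with
  | nil => rfl
  | cons x xs ih => simp [ih, PySem.Set.update_append]

theorem pv_block_filter (L : List String) (u s : String) :
    L.Nodup →
    ((((L.map (fun s' => (s', u))).filter (fun p => p.1 == s)).map (·.2)) =
      if L.contains s then [u] else []) := by
  induction L with
  | nil => intro _; rfl
  | cons a L ih =>
    intro hnd
    rw [List.nodup_cons] at hnd
    obtain ⟨ha, hL⟩ := hnd
    by_cases h : a = s
    · subst h
      have hcf : L.contains a = false := by
        simp only [List.contains_eq_mem, decide_eq_false_iff_not]
        exact ha
      simp [ih hL, hcf, ha]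
    · have hb : (a == s) = false := by simp [h]
      simp [hb, ih hL, h, Ne.symm h]

theorem pv_matched_eq (us : List String) (s : String) :
    ((us.map (fun u => (u, pvServicesOf u))).filter (fun t => t.2.contains s)).map (·.1) =
      (((us.flatMap (fun u => (pvServicesOf u).map (fun s' => (s', u)))).filter
        (fun p => p.1 == s)).map (·.2)) := by
  induction us with
  | nil => rfl
  | cons u us ih =>
    simp only [List.map_cons, List.filter_cons, List.flatMap_cons, List.filter_append,
      List.map_append]
    rw [pv_block_filter _ u s (pv_nodup_services u)]
    simp only [List.contains_eq_mem] at ih ⊢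
    by_cases h : s ∈ pvServicesOf u
    · simp [h, ih]
    · simp [h, ih]

-- common normal form of both results
def pvFlat (env_vars : List String) : List String :=
  env_vars.flatMap (fun v => pvServicesOf (PySem.Str.upper v))

def pvBucket (env_vars : List String) (s : String) : List String :=
  PySem.Set.update
    (PySem.Set.ofList (((pvPairs env_vars).filter (fun p => p.1 == s)).map (·.2)))
    (pvLookup pvDefaults s)

theorem pv_pairs_map_fst (env_vars : List String) :
    (pvPairs env_vars).map (·.1) = pvFlat env_vars := by
  simp [pvPairs, pvFlat, List.map_flatMap, List.map_map, Function.comp_def]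

theorem pv_A_items (env_vars : List String) :
    service_requirements_from_env_vars_py env_vars =
      (PySem.Set.ofList (pvFlat env_vars)).map (fun s => (s, pvBucket env_vars s)) := by
  rw [pv_A_eq, pv_A_fold, pv_defpass_eq_foldl]
  have hnd : ((pvPairs env_vars).foldl pvStep PySem.Dict.empty).keys.Nodup :=
    pv_nodup_keys_foldl_step _ _ PySem.Dict.nodup_keys_empty
  have hkeys : ((pvPairs env_vars).foldl pvStep PySem.Dict.empty).keys =
      PySem.Set.ofList (pvFlat env_vars) := by
    rw [pv_keys_foldl_step, pv_pairs_map_fst]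
    rfl
  have hndf : (pvDefaults.foldl (fun d e => if d.contains e.1 then pyAdd d e.1 e.2 else d)
      ((pvPairs env_vars).foldl pvStep PySem.Dict.empty)).keys.Nodup := by
    rw [pv_deffold_keys]; exact hnd
  rw [PySem.Dict.items_eq_map_keys _ hndf [], pv_deffold_keys, hkeys]
  apply List.map_congr_left
  intro s hs
  have hc : ((pvPairs env_vars).foldl pvStep PySem.Dict.empty).contains s = true := by
    rw [PySem.Dict.contains_iff_mem_keys, hkeys]; exact hs
  rw [pv_deffold_getD _ _ _ (by decide) hc, pv_getD_foldl_step]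
  rfl

theorem pv_items_foldl_insert_fresh_id (l : List String) (vfun : String → List String)
    (h2 : l.Nodup) :
    (l.foldl (fun d a => d.insert a (vfun a))
        (PySem.Dict.empty : PySem.Dict String (List String))).items =
      l.map (fun a => (a, vfun a)) := by
  have := PySem.Dict.items_foldl_insert_fresh (l := l) (k := fun a => a) (v := vfun)
    (d := PySem.Dict.empty) (by simp [PySem.Dict.contains_empty]) (by simpa using h2)
  simpa using this

theorem pv_B_shape (us : List String) :
    (((us.map (fun u => (u, pvServicesOf u))).foldl
        (fun o t => t.2.foldl (fun o s => if o.contains s then o else o ++ [s]) o)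
        ([] : List String)).foldl
      (fun d s =>
        d.insert s
          ((pvLookup pvDefaults s).foldl (fun ks k => if ks.contains k then ks else ks ++ [k])
            ((us.map (fun u => (u, pvServicesOf u))).foldl
              (fun ks t => if t.2.contains s && !ks.contains t.1 then ks ++ [t.1] else ks)
              ([] : List String))))
      (PySem.Dict.empty : PySem.Dict String (List String))).items =
    (PySem.Set.ofList (us.flatMap pvServicesOf)).map
      (fun s => (s, PySem.Set.update
        (PySem.Set.ofList (((us.flatMap (fun u => (pvServicesOf u).map (fun s' => (s', u)))).filter
          (fun p => p.1 == s)).map (·.2)))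
        (pvLookup pvDefaults s))) := by
  rw [show (fun (o : List String) (t : String × List String) =>
      List.foldl (fun o s => if o.contains s then o else o ++ [s]) o t.2) =
      (fun o t => PySem.Set.update o t.2) from rfl]
  rw [pv_foldl_update]
  have ho : PySem.Set.update ([] : List String)
      ((us.map (fun u => (u, pvServicesOf u))).flatMap (·.2)) =
      PySem.Set.ofList (us.flatMap pvServicesOf) := by
    rw [List.flatMap_map]
    rfl
  rw [ho]
  have hg : ∀ s : String, (us.map (fun u => (u, pvServicesOf u))).foldl
      (fun ks t => if t.2.contains s && !ks.contains t.1 then ks ++ [t.1] else ks) [] =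
      PySem.Set.ofList (((us.flatMap (fun u => (pvServicesOf u).map (fun s' => (s', u)))).filter
        (fun p => p.1 == s)).map (·.2)) := by
    intro s
    have e1 : (fun (ks : List String) (t : String × List String) =>
        if t.2.contains s && !ks.contains t.1 then ks ++ [t.1] else ks) =
        (fun ks t => if t.2.contains s then PySem.Set.add ks t.1 else ks) := by
      funext ks t
      by_cases h1 : s ∈ t.2 <;> by_cases h2 : t.1 ∈ ks <;>
        simp [h1, h2, PySem.Set.add, List.contains_eq_mem]
    rw [e1, ← pv_foldl_filter_map (l := us.map (fun u => (u, pvServicesOf u)))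
      (c := fun t => t.2.contains s) (g := (·.1)) (f := PySem.Set.add) (d := [])]
    rw [pv_matched_eq]
    rfl
  simp only [hg]
  exact pv_items_foldl_insert_fresh_id _ _ (PySem.Set.nodup_ofList _)

theorem pv_B_items (env_vars : List String) :
    service_requirements_from_env_vars_py_alt env_vars =
      (PySem.Set.ofList (pvFlat env_vars)).map (fun s => (s, pvBucket env_vars s)) := by
  have htagged : env_vars.map (fun v => (PySem.Str.upper v, pvServicesOf (PySem.Str.upper v))) =
      (env_vars.map (fun v => PySem.Str.upper v)).map (fun u => (u, pvServicesOf u)) := by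
    rw [List.map_map]
    rfl
  have hflat : pvFlat env_vars =
      (env_vars.map (fun v => PySem.Str.upper v)).flatMap pvServicesOf := by
    rw [List.flatMap_map]
    rfl
  have hpairs : pvPairs env_vars =
      (env_vars.map (fun v => PySem.Str.upper v)).flatMap
        (fun u => (pvServicesOf u).map (fun s' => (s', u))) := by
    rw [List.flatMap_map]
    rfl
  unfold service_requirements_from_env_vars_py_alt
  simp only [htagged, hflat, hpairs, pvBucket]
  exact pv_B_shape _

-- ===== VERDICT (by name: the statement is the Claim_ definition above) =====
theorem service_requirements_from_env_vars_py_spec : Claim_equal_service_requirements_from_env_vars_py := by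
  intro env_vars _
  unfold Spec_service_requirements_from_env_vars_py
  rw [pv_A_items, pv_B_items]
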